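-- pv_equiv track=rewrite | github.com/rachel3834/robonet_tools | data_reduction/event_cat_build.py | mark_spitzer_events
-- ===== SOURCE A (Python) =====
-- def mark_spitzer_events(main_catalog, add_catalog):
--     """Function to crossmatch two catalogs on event name and combine the
--     results"""
--
--     combined_catalog = {}
--     for target_name, data in main_catalog.items():
--         if target_name in add_catalog.keys():
--             add_data = add_catalog[target_name]
--             data['spitzer_target'] = True
--         else:
--             data['spitzer_target'] = False
--         combined_catalog[target_name] = data
--
--     return combined_catalog
-- ===== SOURCE B (Python) =====
-- def mark_spitzer_events(main_catalog, add_catalog):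
--     """Crossmatch two catalogs on event name by a sort-and-merge join:
--     walk the two sorted name lists with two pointers to collect the set of
--     matched names, then build the combined catalog, mutating each data
--     dict in place like the original."""
--     main_names = sorted(main_catalog)
--     add_names = sorted(add_catalog)
--     matched = set()
--     i = 0
--     j = 0
--     while i < len(main_names) and j < len(add_names):
--         if main_names[i] < add_names[j]:
--             i += 1
--         elif add_names[j] < main_names[i]:
--             j += 1
--         else:
--             matched.add(main_names[i])
--             i += 1
--             j += 1
--     combined_catalog = {}
--     for target_name, data in main_catalog.items():
--         data['spitzer_target'] = target_name in matched
--         combined_catalog[target_name] = data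
--     return combined_catalog
-- ===== Notes on version B (the rewrite author's own statement) =====
-- stated objective: alternative
-- what changed: B replaces A's per-entry hash-membership test against add_catalog by a sort-and-merge join: it sorts both name lists, collects the matched names with a two-pointer merge, and then flags each entry from that matched set.
import Mathlib
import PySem

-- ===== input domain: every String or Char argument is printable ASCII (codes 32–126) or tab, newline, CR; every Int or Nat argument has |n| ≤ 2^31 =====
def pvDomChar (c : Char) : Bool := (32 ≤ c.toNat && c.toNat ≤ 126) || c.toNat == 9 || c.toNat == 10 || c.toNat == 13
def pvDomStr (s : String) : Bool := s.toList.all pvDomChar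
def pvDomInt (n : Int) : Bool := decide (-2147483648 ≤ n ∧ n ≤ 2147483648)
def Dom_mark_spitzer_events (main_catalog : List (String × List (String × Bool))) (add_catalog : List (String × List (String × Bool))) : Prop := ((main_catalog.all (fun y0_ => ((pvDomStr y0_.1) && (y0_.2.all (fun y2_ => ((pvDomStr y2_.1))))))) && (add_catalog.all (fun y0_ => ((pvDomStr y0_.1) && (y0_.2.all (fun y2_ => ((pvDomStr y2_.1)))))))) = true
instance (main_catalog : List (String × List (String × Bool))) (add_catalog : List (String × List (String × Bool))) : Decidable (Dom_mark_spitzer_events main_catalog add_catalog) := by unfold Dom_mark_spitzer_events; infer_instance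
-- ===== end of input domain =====

-- B replaces A's per-entry membership test against add_catalog by a sort-and-merge join
-- (two-pointer walk over the two sorted name lists collecting the matched names); the
-- equivalence is about the RETURN value (both Pythons also mutate the per-target data
-- dicts in place in the same way).


-- ===== PORT A =====
-- for target_name, data in main_catalog.items(): set data['spitzer_target'] by membership
-- in add_catalog, combined_catalog[target_name] = data
def mark_spitzer_events (main_catalog : List (String × List (String × Bool))) (add_catalog : List (String × List (String × Bool))) : List (String × List (String × Bool)) :=
  (main_catalog.foldl
    (fun combined p =>
      let data := PySem.Dict.mk p.2
      let data' :=
        if (PySem.Dict.mk add_catalog).contains p.1 then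
          let _add_data := (PySem.Dict.mk add_catalog).get? p.1
          data.insert "spitzer_target" true
        else
          data.insert "spitzer_target" false
      combined.insert p.1 data'.items)
    PySem.Dict.empty).items

-- ===== PORT B =====
-- the two-pointer while loop of Source B: i/j advance through the sorted name lists; here the
-- consumed prefixes are dropped from the lists instead of keeping indices
def pvMergeMatch (l1 l2 : List String) (matched : PySem.Set String) : PySem.Set String :=
  match l1, l2 with
  | [], _ => matched
  | _ :: _, [] => matched
  | a :: t1, b :: t2 =>
    if a < b then pvMergeMatch t1 (b :: t2) matched
    else if b < a then pvMergeMatch (a :: t1) t2 matched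
    else pvMergeMatch t1 t2 (PySem.Set.add matched a)
termination_by l1.length + l2.length
decreasing_by all_goals (simp only [List.length_cons]; omega)

-- sort both name lists, merge-join them into the matched set, then build the combined
-- catalog flagging each entry from that set
def mark_spitzer_events_alt (main_catalog : List (String × List (String × Bool))) (add_catalog : List (String × List (String × Bool))) : List (String × List (String × Bool)) :=
  let main_names := PySem.List.sorted (main_catalog.map Prod.fst) (fun x => x) false
  let add_names := PySem.List.sorted (add_catalog.map Prod.fst) (fun x => x) false
  let matched := pvMergeMatch main_names add_names PySem.Set.empty
  (main_catalog.foldl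
    (fun combined p =>
      combined.insert p.1 (((PySem.Dict.mk p.2).insert "spitzer_target" (PySem.Set.contains matched p.1)).items))
    PySem.Dict.empty).items

-- ===== PRECONDITION & SPEC =====
-- Pre_ excludes main_catalog lists with duplicate target names: main_catalog is a Python
-- dict, which cannot carry duplicate keys, so such association lists represent no actual
-- input of A.
def Pre_mark_spitzer_events (main_catalog : List (String × List (String × Bool))) (add_catalog : List (String × List (String × Bool))) : Prop :=
  (main_catalog.map Prod.fst).Nodup
instance (main_catalog : List (String × List (String × Bool))) (add_catalog : List (String × List (String × Bool))) : Decidable (Pre_mark_spitzer_events main_catalog add_catalog) := by unfold Pre_mark_spitzer_events; infer_instance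
def pvWitness_mark_spitzer_events : (List (String × List (String × Bool))) × (List (String × List (String × Bool))) :=
  ([("ev1", [("x", true)]), ("ev2", [])], [("ev2", []), ("ev3", [("y", false)])])
def Spec_mark_spitzer_events (main_catalog : List (String × List (String × Bool))) (add_catalog : List (String × List (String × Bool))) (out : List (String × List (String × Bool))) : Prop := out = mark_spitzer_events_alt main_catalog add_catalog
instance (main_catalog : List (String × List (String × Bool))) (add_catalog : List (String × List (String × Bool))) (out : List (String × List (String × Bool))) : Decidable (Spec_mark_spitzer_events main_catalog add_catalog out) := by unfold Spec_mark_spitzer_events; infer_instance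

-- ===== CLAIM (what is proved, stated in full; the proofs are below) =====
def Claim_equal_mark_spitzer_events : Prop := ∀ (main_catalog : List (String × List (String × Bool))) (add_catalog : List (String × List (String × Bool))), Dom_mark_spitzer_events main_catalog add_catalog → Pre_mark_spitzer_events main_catalog add_catalog → Spec_mark_spitzer_events main_catalog add_catalog (mark_spitzer_events main_catalog add_catalog)

-- ===== LEMMAS AND PROOFS =====

-- per-entry shape both sides converge to: the name, and its data with spitzer_target set to S name
def pvEntry (S : String → Bool) (p : String × List (String × Bool)) : String × List (String × Bool) :=
  (p.1, ((PySem.Dict.mk p.2).insert "spitzer_target" (S p.1)).items)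

theorem markA_eq_map (main add : List (String × List (String × Bool)))
    (hnd : (main.map Prod.fst).Nodup) :
    mark_spitzer_events main add = main.map (pvEntry (fun n => (PySem.Dict.mk add).contains n)) := by
  unfold mark_spitzer_events
  have hstep : (fun (combined : PySem.Dict String (List (String × Bool))) (p : String × List (String × Bool)) =>
      let data := PySem.Dict.mk p.2
      let data' :=
        if (PySem.Dict.mk add).contains p.1 then
          let _add_data := (PySem.Dict.mk add).get? p.1
          data.insert "spitzer_target" true
        else
          data.insert "spitzer_target" false
      combined.insert p.1 data'.items)
      = (fun combined p => combined.insert p.1 ((pvEntry (fun n => (PySem.Dict.mk add).contains n) p).2)) := by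
    funext combined p
    simp only [pvEntry]
    by_cases h : (PySem.Dict.mk add).contains p.1 = true <;> simp [h]
  rw [hstep]
  have := PySem.Dict.items_foldl_insert_fresh (l := main)
      (k := Prod.fst) (v := fun p => (pvEntry (fun n => (PySem.Dict.mk add).contains n) p).2)
      (d := PySem.Dict.empty)
      (by intro a _; simp) hnd
  simpa [pvEntry] using this

-- the two-pointer merge over sorted lists collects exactly the common names
theorem mem_pvMergeMatch (x : String) : ∀ (l1 l2 : List String) (m : PySem.Set String),
    l1.Pairwise (· ≤ ·) → l2.Pairwise (· ≤ ·) →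
    (x ∈ pvMergeMatch l1 l2 m ↔ x ∈ m ∨ (x ∈ l1 ∧ x ∈ l2)) := by
  intro l1 l2 m
  induction l1, l2, m using pvMergeMatch.induct with
  | case1 l2 m => intro _ _; simp [pvMergeMatch]
  | case2 m a t1 => intro _ _; simp [pvMergeMatch]
  | case3 m a t1 b t2 hab ih =>
    intro h1 h2
    have hnb : x = a → x ∉ b :: t2 := by
      intro hx hxin
      rcases List.mem_cons.mp hxin with h | h
      · exact absurd (hx ▸ h ▸ hab) (lt_irrefl _)
      · have := (List.pairwise_cons.mp h2).1 x h
        exact absurd (lt_of_lt_of_le hab (hx ▸ this)) (lt_irrefl _)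
    rw [pvMergeMatch, if_pos hab, ih (List.Pairwise.of_cons h1) h2]
    constructor
    · rintro (h | ⟨h, h'⟩)
      · exact Or.inl h
      · exact Or.inr ⟨List.mem_cons_of_mem _ h, h'⟩
    · rintro (h | ⟨h, h'⟩)
      · exact Or.inl h
      · rcases List.mem_cons.mp h with h | h
        · exact absurd h' (hnb h)
        · exact Or.inr ⟨h, h'⟩
  | case4 m a t1 b t2 hab hba ih =>
    intro h1 h2
    have hna : x = b → x ∉ a :: t1 := by
      intro hx hxin
      rcases List.mem_cons.mp hxin with h | h
      · exact absurd (hx ▸ h ▸ hba) (lt_irrefl _)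
      · have := (List.pairwise_cons.mp h1).1 x h
        exact absurd (lt_of_lt_of_le hba (hx ▸ this)) (lt_irrefl _)
    rw [pvMergeMatch, if_neg hab, if_pos hba, ih h1 (List.Pairwise.of_cons h2)]
    constructor
    · rintro (h | ⟨h, h'⟩)
      · exact Or.inl h
      · exact Or.inr ⟨h, List.mem_cons_of_mem _ h'⟩
    · rintro (h | ⟨h, h'⟩)
      · exact Or.inl h
      · rcases List.mem_cons.mp h' with h'' | h''
        · exact absurd h (hna h'')
        · exact Or.inr ⟨h, h''⟩
  | case5 m a t1 b t2 hab hba ih =>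
    intro h1 h2
    have heq : a = b := le_antisymm (not_lt.mp hba) (not_lt.mp hab)
    subst heq
    rw [pvMergeMatch, if_neg hab, if_neg hba,
        ih (List.Pairwise.of_cons h1) (List.Pairwise.of_cons h2)]
    by_cases hx : x = a
    · subst hx; simp [PySem.Set.mem_add]
    · simp [PySem.Set.mem_add, hx]

theorem markB_eq_map (main add : List (String × List (String × Bool)))
    (hnd : (main.map Prod.fst).Nodup) :
    mark_spitzer_events_alt main add = main.map (pvEntry (fun n => (PySem.Dict.mk add).contains n)) := by
  unfold mark_spitzer_events_alt
  rw [PySem.Dict.items_foldl_insert_fresh (l := main)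
      (k := Prod.fst)
      (v := fun p => ((PySem.Dict.mk p.2).insert "spitzer_target"
        (PySem.Set.contains (pvMergeMatch
          (PySem.List.sorted (main.map Prod.fst) (fun x => x) false)
          (PySem.List.sorted (add.map Prod.fst) (fun x => x) false)
          PySem.Set.empty) p.1)).items)
      (d := PySem.Dict.empty)
      (by intro a _; simp) hnd]
  simp only [PySem.Dict.empty, List.nil_append]
  apply List.map_congr_left
  intro p hp
  simp only [pvEntry]
  refine Prod.ext rfl ?_
  have h1 := PySem.List.sorted_pairwise (xs := main.map Prod.fst) (key := fun x => x)
  have h2 := PySem.List.sorted_pairwise (xs := add.map Prod.fst) (key := fun x => x)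
  have hc : PySem.Set.contains (pvMergeMatch
      (PySem.List.sorted (main.map Prod.fst) (fun x => x) false)
      (PySem.List.sorted (add.map Prod.fst) (fun x => x) false)
      PySem.Set.empty) p.1 = (PySem.Dict.mk add).contains p.1 := by
    rw [Bool.eq_iff_iff, PySem.Set.contains_iff,
        mem_pvMergeMatch p.1 _ _ _ h1 h2]
    have hpm : p.1 ∈ main.map Prod.fst := List.mem_map_of_mem hp
    simp [PySem.List.mem_sorted, PySem.Set.empty, hpm]
  rw [hc]

-- ===== VERDICT (by name: the statement is the Claim_ definition above) =====
theorem mark_spitzer_events_spec : Claim_equal_mark_spitzer_events := by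
  intro main add _ hpre
  unfold Spec_mark_spitzer_events
  rw [markA_eq_map main add hpre, markB_eq_map main add hpre]
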